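-- pv_equiv track=rewrite | github.com/wangyang581/uav | src/utils.py | id_in_list_3
-- ===== SOURCE A (Python) =====
-- def id_in_list_3(ids, lists):
--     for i in range(0, len(ids)):
--         a = 0
--         for j in range(0, len(lists)):
--             if ids[i] in lists[j]:
--                 a += 1
--         if a >= 1:
--             return True
--
--     return False
-- ===== SOURCE B (Python) =====
-- def id_in_list_3(ids, lists):
--     id_set = set(ids)
--     for lst in lists:
--         for e in lst:
--             if e in id_set:
--                 return True
--     return False
-- ===== Notes on version B (the rewrite author's own statement) =====
-- stated objective: idiomatic
-- what changed: B builds a set of ids once and scans the list elements for membership in it (early exit on first hit), instead of A's loop over each id with an inner pass counting how many lists contain it.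
import Mathlib
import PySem

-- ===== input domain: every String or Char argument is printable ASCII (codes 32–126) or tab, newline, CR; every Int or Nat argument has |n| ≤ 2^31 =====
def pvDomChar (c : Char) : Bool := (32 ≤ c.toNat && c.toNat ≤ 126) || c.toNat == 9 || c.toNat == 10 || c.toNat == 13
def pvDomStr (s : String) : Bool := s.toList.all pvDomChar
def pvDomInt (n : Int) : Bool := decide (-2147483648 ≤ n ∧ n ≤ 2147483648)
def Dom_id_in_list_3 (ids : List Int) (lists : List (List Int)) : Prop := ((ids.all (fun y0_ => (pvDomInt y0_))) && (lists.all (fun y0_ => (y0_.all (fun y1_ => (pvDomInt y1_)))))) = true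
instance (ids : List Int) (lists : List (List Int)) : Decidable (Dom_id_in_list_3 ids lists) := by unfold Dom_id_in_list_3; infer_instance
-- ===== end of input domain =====

-- B replaces A's per-id pass counting containing lists by one scan of the list
-- elements against a set of the ids built once (objective: idiomatic).

-- ===== PORT A =====
-- for each id: count (a) how many of the lists contain it; return True if a >= 1
def pvCountA (x : Int) (lists : List (List Int)) : Int :=
  lists.foldl (fun a l => if l.contains x then a + 1 else a) 0

def pvGoA (lists : List (List Int)) : List Int → Bool
  | [] => false
  | x :: rest => if pvCountA x lists ≥ 1 then true else pvGoA lists rest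

def id_in_list_3 (ids : List Int) (lists : List (List Int)) : Bool :=
  pvGoA lists ids

-- ===== PORT B =====
def pvGoBInner (s : PySem.Set Int) : List Int → Bool
  | [] => false
  | e :: rest => if PySem.Set.contains s e then true else pvGoBInner s rest

def pvGoB (s : PySem.Set Int) : List (List Int) → Bool
  | [] => false
  | l :: rest => if pvGoBInner s l then true else pvGoB s rest

def id_in_list_3_alt (ids : List Int) (lists : List (List Int)) : Bool :=
  pvGoB (PySem.Set.ofList ids) lists

-- ===== PRECONDITION & SPEC =====
def Spec_id_in_list_3 (ids : List Int) (lists : List (List Int)) (out : Bool) : Prop := out = id_in_list_3_alt ids lists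
instance (ids : List Int) (lists : List (List Int)) (out : Bool) : Decidable (Spec_id_in_list_3 ids lists out) := by unfold Spec_id_in_list_3; infer_instance

-- ===== CLAIM (what is proved, stated in full; the proofs are below) =====
def Claim_equal_id_in_list_3 : Prop := ∀ (ids : List Int) (lists : List (List Int)), Dom_id_in_list_3 ids lists → Spec_id_in_list_3 ids lists (id_in_list_3 ids lists)

-- ===== LEMMAS AND PROOFS =====

theorem pvCountA_ge_one (x : Int) (lists : List (List Int)) (n : Int) (hn : 0 ≤ n) :
    lists.foldl (fun a l => if l.contains x then a + 1 else a) n ≥ 1 ↔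
      (n ≥ 1 ∨ ∃ l ∈ lists, x ∈ l) := by
  induction lists generalizing n with
  | nil => simp
  | cons l rest ih =>
    simp only [List.foldl_cons]
    by_cases h : l.contains x = true
    · rw [if_pos h, ih (n + 1) (by omega)]
      simp only [List.mem_cons]
      constructor
      · rintro (h1 | ⟨l', hl', hx⟩)
        · exact Or.inr ⟨l, Or.inl rfl, by simpa using h⟩
        · exact Or.inr ⟨l', Or.inr hl', hx⟩
      · rintro (h1 | ⟨l', _, _⟩)
        · exact Or.inl (by omega)
        · exact Or.inl (by omega)
    · rw [if_neg h, ih n hn]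
      simp only [List.mem_cons]
      constructor
      · rintro (h1 | ⟨l', hl', hx⟩)
        · exact Or.inl h1
        · exact Or.inr ⟨l', Or.inr hl', hx⟩
      · rintro (h1 | ⟨l', hl', hx⟩)
        · exact Or.inl h1
        · rcases hl' with rfl | hl'
          · exact absurd (by simpa using hx) (by simpa using h)
          · exact Or.inr ⟨l', hl', hx⟩

theorem pvGoA_iff (lists : List (List Int)) (ids : List Int) :
    pvGoA lists ids = true ↔ ∃ x ∈ ids, ∃ l ∈ lists, x ∈ l := by
  induction ids with
  | nil => simp [pvGoA]
  | cons x rest ih =>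
    simp only [pvGoA]
    by_cases h : pvCountA x lists ≥ 1
    · rw [if_pos h]
      simp only [true_iff]
      rw [pvCountA, pvCountA_ge_one x lists 0 (by omega)] at h
      rcases h with h1 | ⟨l, hl, hx⟩
      · omega
      · exact ⟨x, List.mem_cons_self, l, hl, hx⟩
    · rw [if_neg h, ih]
      constructor
      · rintro ⟨y, hy, hl⟩
        exact ⟨y, List.mem_cons_of_mem _ hy, hl⟩
      · rintro ⟨y, hy, l, hl, hx⟩
        rcases List.mem_cons.mp hy with rfl | hy
        · exact absurd ((pvCountA_ge_one y lists 0 (by omega)).mpr (Or.inr ⟨l, hl, hx⟩)) h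
        · exact ⟨y, hy, l, hl, hx⟩

theorem pvGoBInner_iff (s : PySem.Set Int) (l : List Int) :
    pvGoBInner s l = true ↔ ∃ e ∈ l, e ∈ s := by
  induction l with
  | nil => simp [pvGoBInner]
  | cons e rest ih =>
    simp only [pvGoBInner]
    by_cases h : PySem.Set.contains s e = true
    · rw [if_pos h]
      exact ⟨fun _ => ⟨e, List.mem_cons_self, by simpa [PySem.Set.contains] using h⟩, fun _ => rfl⟩
    · rw [if_neg h, ih]
      constructor
      · rintro ⟨y, hy, hs⟩; exact ⟨y, List.mem_cons_of_mem _ hy, hs⟩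
      · rintro ⟨y, hy, hs⟩
        rcases List.mem_cons.mp hy with rfl | hy
        · exact absurd (by simpa [PySem.Set.contains] using hs) (by simpa using h)
        · exact ⟨y, hy, hs⟩

theorem pvGoB_iff (s : PySem.Set Int) (lists : List (List Int)) :
    pvGoB s lists = true ↔ ∃ l ∈ lists, ∃ e ∈ l, e ∈ s := by
  induction lists with
  | nil => simp [pvGoB]
  | cons l rest ih =>
    simp only [pvGoB]
    by_cases h : pvGoBInner s l = true
    · rw [if_pos h]
      exact ⟨fun _ => ⟨l, List.mem_cons_self, (pvGoBInner_iff s l).mp h⟩, fun _ => rfl⟩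
    · rw [if_neg h, ih]
      constructor
      · rintro ⟨l', hl', hx⟩; exact ⟨l', List.mem_cons_of_mem _ hl', hx⟩
      · rintro ⟨l', hl', hx⟩
        rcases List.mem_cons.mp hl' with rfl | hl'
        · exact absurd ((pvGoBInner_iff s l').mpr hx) (by simpa using h)
        · exact ⟨l', hl', hx⟩

-- ===== VERDICT (by name: the statement is the Claim_ definition above) =====
theorem id_in_list_3_spec : Claim_equal_id_in_list_3 := by
  intro ids lists _
  unfold Spec_id_in_list_3 id_in_list_3 id_in_list_3_alt
  rw [Bool.eq_iff_iff, pvGoA_iff, pvGoB_iff]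
  constructor
  · rintro ⟨x, hx, l, hl, hxl⟩
    exact ⟨l, hl, x, hxl, (PySem.Set.mem_ofList ids x).mpr hx⟩
  · rintro ⟨l, hl, e, hel, hes⟩
    exact ⟨e, (PySem.Set.mem_ofList ids e).mp hes, l, hl, hel⟩
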